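-- pv_equiv track=rewrite | github.com/Demiko/DinoHopper | DinoHopper/DinoHopper.py | dino
-- ===== SOURCE A (Python) =====
-- from typing import List
--
-- def dino(input: str) -> (bool, List[int]):
--     path = [(0,1,1)] # (position, next_step, next_distance)
--     while(len(path) > 0):
--         position, next_step, next_distance = path.pop()
--         if(position < len(input) and next_step < 2):
--             terrain = input[position]
--             if(terrain == 'F'):
--                 out_path = [i for (i,_,_) in path]
--                 out_path.append(position)
--                 return (True, out_path)
--             if(terrain != 'L'):
--                 path.append((position, next_step + 1, next_distance + 1))
--                 position += next_distance
--                 next_step = (-1 if next_distance > 1 else 0)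
--                 next_distance = next_distance + next_step
--                 path.append((position, next_step, next_distance))
--     return (False, [])
-- ===== SOURCE B (Python) =====
-- from typing import List
--
-- def dino(input: str) -> (bool, List[int]):
--     # Direct recursive DFS over jump distances: after arriving with a jump of
--     # distance d, the next jump may have distance d-1, d, or d+1 (min 1);
--     # the very first move has distance 1. 'F' = goal, 'L' = forbidden.
--     n = len(input)
--     def search(p: int, d: int):
--         if p >= n:
--             return None
--         c = input[p]
--         if c == 'F':
--             return [p]
--         if c == 'L':
--             return None
--         for nd in range(max(1, d - 1), d + 2):
--             r = search(p + nd, nd)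
--             if r is not None:
--                 return [p] + r
--         return None
--     r = search(0, 0)
--     return (True, r) if r is not None else (False, [])
-- ===== Notes on version B (the rewrite author's own statement) =====
-- stated objective: simpler
-- what changed: Replaced A's explicit-stack state machine over (position, next_step, next_distance) triples, which re-pops encoded backtrack entries, by a direct recursive depth-first search that tries jump distances max(1,d-1)..d+1 and builds the path on return.
import Mathlib
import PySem

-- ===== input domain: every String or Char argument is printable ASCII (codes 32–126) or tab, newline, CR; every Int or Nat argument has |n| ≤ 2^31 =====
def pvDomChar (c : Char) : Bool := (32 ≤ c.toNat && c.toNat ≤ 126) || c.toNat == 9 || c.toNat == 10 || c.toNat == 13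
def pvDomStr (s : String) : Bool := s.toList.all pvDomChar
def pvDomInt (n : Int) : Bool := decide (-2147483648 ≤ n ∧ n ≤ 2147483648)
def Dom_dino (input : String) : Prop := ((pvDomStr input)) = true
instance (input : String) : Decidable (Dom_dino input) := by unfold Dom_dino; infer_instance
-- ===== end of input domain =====

-- B replaces A's explicit-stack state machine over (position, next_step, next_distance)
-- triples by a direct recursive depth-first search over jump distances: simpler, same search.


-- ===== PORT A =====

-- weight of one stack entry, used only as the termination measure of dinoLoop
def pvW (n p s : Int) : Nat := 16 ^ (n - p).toNat * 2 ^ ((2:Int) - s).toNat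

theorem pvW_pos (n p s : Int) : 1 ≤ pvW n p s :=
  Nat.one_le_iff_ne_zero.mpr (Nat.mul_ne_zero (pow_ne_zero _ (by decide)) (pow_ne_zero _ (by decide)))

-- Nat core of the measure inequality (kept omega-free to stay small)
theorem pvPow2Pos (m : Nat) : 0 < 2 ^ m := Nat.two_pow_pos m

theorem pvW_key_nat (k j a b : Nat) (hj : j + 1 ≤ k) (ha : 1 ≤ a) (hb : b ≤ 3) :
    16 ^ j * 2 ^ b + 16 ^ k * 2 ^ (a - 1) < 16 ^ k * 2 ^ a := by
  have h1 : 16 ^ j * 2 ^ b < 16 ^ k * 2 ^ (a - 1) := by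
    calc 16 ^ j * 2 ^ b ≤ 16 ^ j * 8 := Nat.mul_le_mul_left _ (Nat.pow_le_pow_right (by decide) hb)
      _ < 16 ^ j * 16 := Nat.mul_lt_mul_of_le_of_lt (Nat.le_refl _) (by decide) (Nat.pow_pos (by decide))
      _ = 16 ^ (j + 1) := (pow_succ 16 j).symm
      _ ≤ 16 ^ k := Nat.pow_le_pow_right (by decide) hj
      _ ≤ 16 ^ k * 2 ^ (a - 1) := Nat.le_mul_of_pos_right _ (pvPow2Pos (a - 1))
  have h2 : 16 ^ k * 2 ^ (a - 1) + 16 ^ k * 2 ^ (a - 1) = 16 ^ k * 2 ^ a := by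
    have e : 2 ^ (a - 1) + 2 ^ (a - 1) = 2 ^ a := by
      rw [← Nat.two_mul, ← pow_succ', Nat.sub_add_cancel ha]
    rw [← Nat.mul_add, e]
  calc 16 ^ j * 2 ^ b + 16 ^ k * 2 ^ (a - 1)
      < 16 ^ k * 2 ^ (a - 1) + 16 ^ k * 2 ^ (a - 1) := Nat.add_lt_add_right h1 _
    _ = 16 ^ k * 2 ^ a := h2

theorem pvToNatLt (n p d : Int) (hp : p < n) (hd : 1 ≤ d) :
    (n - (p + d)).toNat + 1 ≤ (n - p).toNat := by
  have h1 : n - (p + d) ≤ n - p - 1 := by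
    rw [sub_add_eq_sub_sub]
    exact sub_le_sub_left hd (n - p)
  have h2 := Int.toNat_le_toNat h1
  rw [Int.pred_toNat] at h2
  have h3 : 0 < (n - p).toNat := Int.pos_iff_toNat_pos.mp (sub_pos.mpr hp)
  calc (n - (p + d)).toNat + 1 ≤ ((n - p).toNat - 1) + 1 := Nat.add_le_add_right h2 1
    _ = (n - p).toNat := Nat.sub_add_cancel h3

theorem pvTwoSubPos (s : Int) (hs : s < 2) : 0 < ((2:Int) - s).toNat :=
  Int.pos_iff_toNat_pos.mp (sub_pos.mpr hs)

theorem pvIteNat (d : Int) : ((2:Int) - (if 1 < d then (-1:Int) else 0)).toNat ≤ 3 := by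
  split_ifs <;> decide

theorem pvSubOne (s : Int) : ((2:Int) - (s + 1)).toNat = ((2:Int) - s).toNat - 1 := by
  rw [sub_add_eq_sub_sub, Int.pred_toNat]

-- the two states a live entry is replaced by weigh strictly less than the entry
theorem pvW_key (n p s d : Int) (hp : p < n) (hs : s < 2) (hd : 1 ≤ d) :
    pvW n (p + d) (if 1 < d then -1 else 0) + pvW n p (s + 1) < pvW n p s := by
  unfold pvW
  rw [pvSubOne s]
  exact pvW_key_nat _ _ _ _ (pvToNatLt n p d hp hd) (pvTwoSubPos s hs) (pvIteNat d)

-- termination measure of the while loop: total weight of the stack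
def stackW (n : Int) (path : List (Int × Int × Int)) : Nat :=
  (path.map (fun x => pvW n x.1 x.2.1)).sum

theorem pvInvPush (position next_step next_distance : Int) (rest : List (Int × Int × Int))
    (hd : ∀ x ∈ (position, next_step, next_distance) :: rest, 1 ≤ x.2.2) :
    ∀ x ∈ (position + next_distance, (if 1 < next_distance then (-1:Int) else 0),
        next_distance + (if 1 < next_distance then (-1:Int) else 0)) ::
      (position, next_step + 1, next_distance + 1) :: rest, 1 ≤ x.2.2 := by
  intro x hx
  have h1 : 1 ≤ next_distance := hd (position, next_step, next_distance) (List.mem_cons_self ..)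
  simp only [List.mem_cons] at hx
  rcases hx with h | h | h
  · subst h
    dsimp only
    split_ifs with hlt
    · rw [← sub_eq_add_neg]
      exact le_sub_iff_add_le.mpr (Int.lt_iff_add_one_le.mp hlt)
    · rw [add_zero]; exact h1
  · subst h
    dsimp only
    exact le_trans h1 (le_add_of_nonneg_right zero_le_one)
  · exact hd x (List.mem_cons_of_mem _ h)

theorem pvInvTail (y : Int × Int × Int) (rest : List (Int × Int × Int))
    (hd : ∀ x ∈ y :: rest, 1 ≤ x.2.2) : ∀ x ∈ rest, 1 ≤ x.2.2 :=
  fun x hx => hd x (List.mem_cons_of_mem _ hx)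

theorem stackW_cons (n : Int) (x : Int × Int × Int) (rest : List (Int × Int × Int)) :
    stackW n (x :: rest) = pvW n x.1 x.2.1 + stackW n rest := rfl

theorem pvStackPop (n : Int) (x : Int × Int × Int) (rest : List (Int × Int × Int)) :
    stackW n rest < stackW n (x :: rest) := by
  rw [stackW_cons]
  exact Nat.lt_add_of_pos_left (pvW_pos n x.1 x.2.1)

theorem pvStackPush (n position next_step next_distance : Int) (rest : List (Int × Int × Int))
    (hp : position < n) (hs : next_step < 2) (h1 : 1 ≤ next_distance) :
    stackW n ((position + next_distance, (if 1 < next_distance then (-1:Int) else 0),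
        next_distance + (if 1 < next_distance then (-1:Int) else 0)) ::
      (position, next_step + 1, next_distance + 1) :: rest)
      < stackW n ((position, next_step, next_distance) :: rest) := by
  have key := pvW_key n position next_step next_distance hp hs h1
  rw [stackW_cons, stackW_cons, stackW_cons, ← add_assoc]
  exact Nat.add_lt_add_right key _

-- the while loop of A; `path` is the Python list with the TOP at the head
-- (append = cons, pop = head).  `hd` records the invariant that every stored
-- next_distance is ≥ 1 (true for every stack A ever builds); it is needed only
-- for termination.
def dinoLoop (input : String) (path : List (Int × Int × Int))
    (hd : ∀ x ∈ path, 1 ≤ x.2.2) : Bool × List Int :=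
  match path, hd with
  | [], _ => (false, [])
  | (position, next_step, next_distance) :: rest, hd =>
    if _hg : position < PySem.Str.len input ∧ next_step < 2 then
      -- input[position]: position is always ≥ 0 on reachable stacks, so the default is unreachable
      let terrain := (PySem.Str.pyGet? input position).getD ' '
      if terrain = 'F' then
        (true, (rest.map (fun x => x.1)).reverse ++ [position])
      else if terrain ≠ 'L' then
        dinoLoop input
          ((position + next_distance,
              (if 1 < next_distance then (-1:Int) else 0),
              next_distance + (if 1 < next_distance then (-1:Int) else 0)) ::
            (position, next_step + 1, next_distance + 1) :: rest)
          (pvInvPush position next_step next_distance rest hd)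
      else
        dinoLoop input rest (pvInvTail _ rest hd)
    else
      dinoLoop input rest (pvInvTail _ rest hd)
termination_by stackW (PySem.Str.len input) path
decreasing_by
  · have h1 : 1 ≤ next_distance := hd (position, next_step, next_distance) (List.mem_cons_self ..)
    exact pvStackPush (PySem.Str.len input) position next_step next_distance rest _hg.1 _hg.2 h1
  · exact pvStackPop (PySem.Str.len input) _ rest
  · exact pvStackPop (PySem.Str.len input) _ rest

theorem pvInit : ∀ x ∈ [((0:Int), (1:Int), (1:Int))], (1:Int) ≤ x.2.2 := by
  intro x hx
  rw [List.mem_singleton] at hx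
  subst hx
  exact le_refl 1

def dino (input : String) : Bool × List Int :=
  dinoLoop input [(0, 1, 1)] pvInit

-- ===== PORT B =====

theorem pvHb (d : Int) : d + 2 ≤ max 1 (d - 1) + 3 := by
  calc d + 2 = d - 1 + 3 := by ring
    _ ≤ max 1 (d - 1) + 3 := Int.add_le_add_right (le_max_right 1 (d - 1)) 3

theorem pvLeSucc (nd : Int) (h : 1 ≤ nd) : 1 ≤ nd + 1 :=
  le_trans h (le_add_of_nonneg_right zero_le_one)

theorem pvHbSucc (nd stop : Int) (hb : stop ≤ nd + 3) : stop ≤ nd + 1 + 3 :=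
  le_trans hb (Int.add_le_add_right (le_add_of_nonneg_right zero_le_one) 3)

theorem pvMeasEnter (len p d : Int) :
    5 * (len - p).toNat + (d + 2 - max 1 (d - 1)).toNat < 5 * (len - p).toNat + 4 := by
  apply Nat.add_lt_add_left
  apply Nat.lt_succ_of_le
  apply Int.toNat_le.mpr
  calc d + 2 - max 1 (d - 1) ≤ d + 2 - (d - 1) := sub_le_sub_left (le_max_right 1 (d - 1)) (d + 2)
    _ = 3 := by ring

theorem pvMeasJump (len p nd stop : Int) (h1 : 1 ≤ nd) (hp : p < len) :
    5 * (len - (p + nd)).toNat + 4 < 5 * (len - p).toNat + (stop - nd).toNat := by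
  calc 5 * (len - (p + nd)).toNat + 4 < 5 * (len - (p + nd)).toNat + 5 :=
        Nat.add_lt_add_left (by decide) _
    _ = 5 * ((len - (p + nd)).toNat + 1) := (Nat.mul_succ 5 _).symm
    _ ≤ 5 * (len - p).toNat := Nat.mul_le_mul_left 5 (pvToNatLt len p nd hp h1)
    _ ≤ 5 * (len - p).toNat + (stop - nd).toNat := Nat.le_add_right _ _

theorem pvMeasNext (len p nd stop : Int) (hlt : nd < stop) :
    5 * (len - p).toNat + (stop - (nd + 1)).toNat < 5 * (len - p).toNat + (stop - nd).toNat := by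
  apply Nat.add_lt_add_left
  rw [sub_add_eq_sub_sub, Int.pred_toNat]
  exact Nat.sub_lt (Int.pos_iff_toNat_pos.mp (sub_pos.mpr hlt)) Nat.one_pos

-- recursive DFS: searchB p d = search(p, d) of Source B; tryFrom is its
-- `for nd in range(max(1, d-1), d+2)` loop (nd = loop variable, stop = d+2).
-- h1/hp only feed the termination proof.
mutual
def searchB (input : String) (p d : Int) : Option (List Int) :=
  if hp : PySem.Str.len input ≤ p then none
  else
    -- input[p]: p is ≥ 0 on every call B makes, so the default is unreachable
    let c := (PySem.Str.pyGet? input p).getD ' '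
    if c = 'F' then some [p]
    else if c = 'L' then none
    else tryFrom input p (max 1 (d - 1)) (d + 2) (le_max_left _ _) (pvHb d) (not_le.mp hp)
termination_by 5 * (PySem.Str.len input - p).toNat + 4
decreasing_by
  exact pvMeasEnter (PySem.Str.len input) p d

def tryFrom (input : String) (p nd stop : Int) (h1 : 1 ≤ nd) (hb : stop ≤ nd + 3)
    (hp : p < PySem.Str.len input) : Option (List Int) :=
  if _hlt : nd < stop then
    match searchB input (p + nd) nd with
    | some r => some (p :: r)
    | none => tryFrom input p (nd + 1) stop (pvLeSucc nd h1) (pvHbSucc nd stop hb) hp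
  else none
termination_by 5 * (PySem.Str.len input - p).toNat + (stop - nd).toNat
decreasing_by
  · exact pvMeasJump (PySem.Str.len input) p nd stop h1 hp
  · exact pvMeasNext (PySem.Str.len input) p nd stop _hlt
end

def dino_alt (input : String) : Bool × List Int :=
  match searchB input 0 0 with
  | some r => (true, r)
  | none => (false, [])

-- ===== PRECONDITION & SPEC =====
def Spec_dino (input : String) (out : Bool × List Int) : Prop := out = dino_alt input
instance (input : String) (out : Bool × List Int) : Decidable (Spec_dino input out) := by unfold Spec_dino; infer_instance

-- ===== CLAIM (what is proved, stated in full; the proofs are below) =====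
def Claim_equal_dino : Prop := ∀ (input : String), Dom_dino input → Spec_dino input (dino input)

-- ===== LEMMAS AND PROOFS =====

-- the DFS value of a single stack entry of A
def exploreA (input : String) (p s d : Int) : Option (List Int) :=
  if _hg : p < PySem.Str.len input ∧ s < 2 ∧ 1 ≤ d then
    let terrain := (PySem.Str.pyGet? input p).getD ' '
    if terrain = 'F' then some [p]
    else if terrain ≠ 'L' then
      match exploreA input (p + d) (if 1 < d then -1 else 0) (if 1 < d then d - 1 else d) with
      | some br => some (p :: br)
      | none => exploreA input p (s + 1) (d + 1)
    else none
  else none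
termination_by pvW (PySem.Str.len input) p s
decreasing_by
  all_goals have key := pvW_key (PySem.Str.len input) p s d _hg.1 _hg.2.1 _hg.2.2
  all_goals first
    | omega
    | (simp only [dite_eq_ite]; omega)

-- denotation of a whole stack, top (head) first
def stackDen (input : String) : List (Int × Int × Int) → Bool × List Int
  | [] => (false, [])
  | (p, s, _d) :: rest =>
    match exploreA input p s _d with
    | some br => (true, (rest.map (fun x => x.1)).reverse ++ br)
    | none => stackDen input rest

theorem loop_eq (input : String) :
    ∀ (N : Nat) (path : List (Int × Int × Int)) (hd : ∀ x ∈ path, 1 ≤ x.2.2),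
      stackW (PySem.Str.len input) path ≤ N →
      dinoLoop input path hd = stackDen input path := by
  intro N
  induction N using Nat.strong_induction_on with
  | _ N IH =>
    intro path hd hle
    match path, hd with
    | [], hd => rw [dinoLoop, stackDen]
    | (p, s, d) :: rest, hd =>
      have h1 : 1 ≤ d := hd (p, s, d) (by simp)
      have hwpos := pvW_pos (PySem.Str.len input) p s
      have hrw : stackW (PySem.Str.len input) ((p, s, d) :: rest)
          = pvW (PySem.Str.len input) p s + stackW (PySem.Str.len input) rest := by
        simp [stackW]
      rw [dinoLoop, stackDen, exploreA]
      simp only [PySem.Str.len_eq, PySem.Str.pyGet?_eq, PySem.Chars.pyGet?_eq_listPyGet?,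
        String.length_toList]
      by_cases hg : p < (input.length : Int) ∧ s < 2
      · have hgg : p < (input.length : Int) ∧ s < 2 ∧ 1 ≤ d := ⟨hg.1, hg.2, h1⟩
        simp only [hg, hgg]
        by_cases hF : (PySem.List.pyGet? input.toList p).getD ' ' = 'F'
        · simp [hF]
        · by_cases hL : (PySem.List.pyGet? input.toList p).getD ' ' = 'L'
          · simp [hL]
            have hlt : stackW (PySem.Str.len input) rest < N := by omega
            exact IH _ hlt rest _ le_rfl
          · simp [hF, hL]
            have hd2 : (if 1 < d then d - 1 else d) = d + (if 1 < d then (-1:Int) else 0) := by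
              split_ifs <;> ring
            rw [hd2]
            have hlt : stackW (PySem.Str.len input)
                ((p + d, (if 1 < d then (-1:Int) else 0), d + (if 1 < d then (-1:Int) else 0)) ::
                  (p, s + 1, d + 1) :: rest) < N := by
              have key := pvW_key (PySem.Str.len input) p s d
                (by simpa [PySem.Str.len_eq] using hg.1) hg.2 h1
              have : stackW (PySem.Str.len input)
                  ((p + d, (if 1 < d then (-1:Int) else 0), d + (if 1 < d then (-1:Int) else 0)) ::
                    (p, s + 1, d + 1) :: rest)
                  = pvW (PySem.Str.len input) (p + d) (if 1 < d then (-1:Int) else 0)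
                    + (pvW (PySem.Str.len input) p (s + 1)
                      + stackW (PySem.Str.len input) rest) := by
                simp [stackW]
              omega
            rw [IH _ hlt _ _ le_rfl]
            rw [stackDen]
            cases hx : exploreA input (p + d) (if 1 < d then (-1:Int) else 0)
                (d + if 1 < d then (-1:Int) else 0) with
            | some br => simp
            | none =>
              simp only
              rw [stackDen]
      · have hng : ¬ (p < (input.length : Int) ∧ s < 2 ∧ 1 ≤ d) := by tauto
        rw [dif_neg hg, dif_neg hng]
        have hlt : stackW (PySem.Str.len input) rest < N := by omega
        exact IH _ hlt rest _ le_rfl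

-- encoding of B's arrival distance as A's (next_step, next_distance) state
def encS (da : Int) : Int := if 1 < da then -1 else if da = 0 then 1 else 0
def encD (da : Int) : Int := if 1 < da then da - 1 else 1

theorem tryFrom_eq (input : String) (p : Int)
    (hp : p < PySem.Str.len input)
    (htF : ¬ (PySem.List.pyGet? input.toList p).getD ' ' = 'F')
    (htL : ¬ (PySem.List.pyGet? input.toList p).getD ' ' = 'L')
    (hS : ∀ p' da, p < p' → 0 ≤ da →
        searchB input p' da = exploreA input p' (encS da) (encD da)) :
    ∀ (j : Nat) (nd : Int) (h1 : 1 ≤ nd) (stop : Int) (hb : stop ≤ nd + 3), (stop - nd).toNat = j →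
      tryFrom input p nd stop h1 hb hp = exploreA input p (2 - (stop - nd)) nd := by
  have hp' : p < (input.length : Int) := by simpa using hp
  intro j
  induction j with
  | zero =>
    intro nd h1 stop hb hj
    rw [tryFrom, dif_neg (by omega : ¬ nd < stop), exploreA]
    simp only [PySem.Str.len_eq, PySem.Str.pyGet?_eq, PySem.Chars.pyGet?_eq_listPyGet?,
      String.length_toList]
    rw [dif_neg (by intro h; omega :
      ¬ (p < (input.length : Int) ∧ 2 - (stop - nd) < 2 ∧ 1 ≤ nd))]
  | succ j IHj =>
    intro nd h1 stop hb hj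
    have hlt : nd < stop := by omega
    rw [tryFrom, dif_pos hlt]
    conv_rhs => rw [exploreA]
    simp only [PySem.Str.len_eq, PySem.Str.pyGet?_eq, PySem.Chars.pyGet?_eq_listPyGet?,
      String.length_toList]
    rw [dif_pos (⟨hp', by omega, h1⟩ :
      p < (input.length : Int) ∧ 2 - (stop - nd) < 2 ∧ 1 ≤ nd)]
    rw [hS (p + nd) nd (by omega) (by omega)]
    have he1 : (if 1 < nd then (-1 : Int) else 0) = encS nd := by
      unfold encS; split_ifs <;> omega
    have he2 : (if 1 < nd then nd - 1 else nd) = encD nd := by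
      unfold encD; split_ifs <;> omega
    simp only [htF, htL, ne_eq, if_neg, not_false_iff, if_true, he1, he2]
    cases hx : exploreA input (p + nd) (encS nd) (encD nd) with
    | some r => simp
    | none =>
      simp only
      have harith : 2 - (stop - nd) + 1 = 2 - (stop - (nd + 1)) := by ring
      rw [IHj (nd + 1) (by omega) stop (by omega) (by omega), ← harith]

theorem search_eq (input : String) :
    ∀ (K : Nat) (p da : Int), (PySem.Str.len input - p).toNat ≤ K → 0 ≤ da →
      searchB input p da = exploreA input p (encS da) (encD da) := by
  intro K
  induction K using Nat.strong_induction_on with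
  | _ K IH =>
    intro p da hK hda
    simp only [PySem.Str.len_eq, String.length_toList] at hK
    have hslt : encS da < 2 := by unfold encS; split_ifs <;> omega
    have hd1 : 1 ≤ encD da := by unfold encD; split_ifs <;> omega
    rw [searchB, exploreA]
    simp only [PySem.Str.len_eq, PySem.Str.pyGet?_eq, PySem.Chars.pyGet?_eq_listPyGet?,
      String.length_toList]
    by_cases hple : (input.length : Int) ≤ p
    · rw [dif_pos hple, dif_neg (by intro h; omega :
        ¬ (p < (input.length : Int) ∧ encS da < 2 ∧ 1 ≤ encD da))]
    · have hp' : p < (input.length : Int) := by omega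
      rw [dif_neg hple, dif_pos (⟨hp', hslt, hd1⟩ :
        p < (input.length : Int) ∧ encS da < 2 ∧ 1 ≤ encD da)]
      by_cases hF : (PySem.List.pyGet? input.toList p).getD ' ' = 'F'
      · simp [hF]
      · by_cases hL : (PySem.List.pyGet? input.toList p).getD ' ' = 'L'
        · simp [hL]
        · simp only [hL, ne_eq, if_neg, not_false_iff, if_true]
          have hS : ∀ p' da', p < p' → 0 ≤ da' →
              searchB input p' da' = exploreA input p' (encS da') (encD da') := by
            intro p' da' hpp' hda'
            have hm : ((PySem.Str.len input : Int) - p').toNat < K := by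
              simp only [PySem.Str.len_eq, String.length_toList]
              omega
            exact IH _ hm p' da' le_rfl hda'
          rw [tryFrom_eq input p (by simpa using hp') hF hL hS
            ((da + 2 - max 1 (da - 1)).toNat) (max 1 (da - 1)) (le_max_left _ _)
            (da + 2) (by omega) rfl]
          have e1 : 2 - (da + 2 - max 1 (da - 1)) = encS da := by
            unfold encS; split_ifs <;> omega
          have e2 : max 1 (da - 1) = encD da := by
            unfold encD; split_ifs <;> omega
          rw [e1, e2]
          conv_lhs => rw [exploreA]
          simp only [PySem.Str.len_eq, PySem.Str.pyGet?_eq, PySem.Chars.pyGet?_eq_listPyGet?,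
            String.length_toList]
          rw [dif_pos (⟨hp', hslt, hd1⟩ :
            p < (input.length : Int) ∧ encS da < 2 ∧ 1 ≤ encD da)]
          simp only [hF, hL, ne_eq, not_false_iff, if_true, if_neg]

-- ===== VERDICT (by name: the statement is the Claim_ definition above) =====
theorem dino_spec : Claim_equal_dino := by
  intro input _hdom
  unfold Spec_dino dino dino_alt
  rw [loop_eq input _ _ _ le_rfl,
    search_eq input ((PySem.Str.len input - 0).toNat) 0 0 le_rfl (le_refl 0)]
  have e1 : encS 0 = 1 := by norm_num [encS]
  have e2 : encD 0 = 1 := by norm_num [encD]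
  rw [e1, e2, stackDen]
  cases hx : exploreA input 0 1 1 with
  | some br => simp
  | none => simp [stackDen]
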